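-- pv_equiv track=rewrite | github.com/johnermon/JosieAlgs | python/src/valid_intersecting_brackets.py | valid_intersecting_brackets
-- ===== SOURCE A (Python) =====
-- def valid_intersecting_brackets(input:str) -> bool:
--     stack:list[str] = []
--     for char in input:
--         if char in  ('(' , '{', '[', '<'):
--             stack.append(char)
--             continue
--
--         #im glad after 20 years python made match cases, thats cool ig
--         open:str
--         match char:
--             case ')':
--                 open = '('
--             case '}':
--                 open = '{'
--             case ']':
--                 open = '['
--             case '>':
--                 open = '<'
--             case _:
--                 continue
--
--         countinue_outer = False
--         for i, curr in enumerate(stack):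
--             if open == curr:
--                 countinue_outer = True
--                 stack.pop(i)
--                 break
--
--         #to those who say that a flag and a branch are more ideomatic in this case than a single
--         #bracket, i say no you are wrong srry, unstructured control flow works better here
--         if countinue_outer:
--             continue
--
--         return False
--
--     #the idea of "truthy" values hurts my head
--     return not bool(stack)
-- ===== SOURCE B (Python) =====
-- def valid_intersecting_brackets(input: str) -> bool:
--     # Per-type counters: intersecting brackets only need counts, not a stack.
--     paren = curly = square = angle = 0
--     for ch in input:
--         if ch == '(':
--             paren += 1
--         elif ch == ')':
--             if paren == 0:
--                 return False
--             paren -= 1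
--         elif ch == '{':
--             curly += 1
--         elif ch == '}':
--             if curly == 0:
--                 return False
--             curly -= 1
--         elif ch == '[':
--             square += 1
--         elif ch == ']':
--             if square == 0:
--                 return False
--             square -= 1
--         elif ch == '<':
--             angle += 1
--         elif ch == '>':
--             if angle == 0:
--                 return False
--             angle -= 1
--     return paren == 0 and curly == 0 and square == 0 and angle == 0
-- ===== Notes on version B (the rewrite author's own statement) =====
-- stated objective: alternative
-- what changed: Replaced the stack with per-bracket-type counters (increment on open, check-and-decrement on close, all zero at end), removing A's inner scan of the stack on every closing bracket; asymptotically O(n) vs A's O(n^2) worst case, but a timing run did not confirm a >=1.5x speedup on its generated inputs.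
import Mathlib
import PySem

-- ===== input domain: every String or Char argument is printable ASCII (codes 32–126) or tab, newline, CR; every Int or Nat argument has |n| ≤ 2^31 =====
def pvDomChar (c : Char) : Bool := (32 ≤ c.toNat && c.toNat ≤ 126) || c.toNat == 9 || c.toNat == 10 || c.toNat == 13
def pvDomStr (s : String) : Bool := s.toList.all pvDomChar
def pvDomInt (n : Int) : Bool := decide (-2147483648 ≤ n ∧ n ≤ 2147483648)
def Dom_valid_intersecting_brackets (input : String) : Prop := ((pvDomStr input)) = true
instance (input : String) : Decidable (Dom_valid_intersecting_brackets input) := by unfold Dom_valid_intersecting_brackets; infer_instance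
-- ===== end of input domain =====

-- B replaces A's stack (with an inner scan per closing bracket) by per-type counters, one linear pass.

-- ===== PORT A =====
-- A's inner loop: enumerate the stack, pop the first element equal to `open` (none = no match).
def pvPopFirst (o : Char) : List Char → Option (List Char)
  | [] => none
  | x :: xs => if o = x then some xs else (pvPopFirst o xs).map (x :: ·)

-- A's match statement mapping a closer to its opener.
def pvOpenOf (c : Char) : Option Char :=
  if c = ')' then some '(' else if c = '}' then some '{'
  else if c = ']' then some '[' else if c = '>' then some '<' else none

def pvLoopA : List Char → List Char → Bool
  | [], stack => stack.isEmpty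
  | c :: rest, stack =>
    if c = '(' ∨ c = '{' ∨ c = '[' ∨ c = '<' then
      pvLoopA rest (stack ++ [c])
    else
      match pvOpenOf c with
      | none => pvLoopA rest stack
      | some o =>
        match pvPopFirst o stack with
        | some stack' => pvLoopA rest stack'
        | none => false

def valid_intersecting_brackets (input : String) : Bool :=
  pvLoopA input.toList []

-- ===== PORT B =====
def pvLoopB : List Char → Nat → Nat → Nat → Nat → Bool
  | [], p, c, s, a => p = 0 && c = 0 && s = 0 && a = 0
  | ch :: rest, p, c, s, a =>
    if ch = '(' then pvLoopB rest (p + 1) c s a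
    else if ch = ')' then (if p = 0 then false else pvLoopB rest (p - 1) c s a)
    else if ch = '{' then pvLoopB rest p (c + 1) s a
    else if ch = '}' then (if c = 0 then false else pvLoopB rest p (c - 1) s a)
    else if ch = '[' then pvLoopB rest p c (s + 1) a
    else if ch = ']' then (if s = 0 then false else pvLoopB rest p c (s - 1) a)
    else if ch = '<' then pvLoopB rest p c s (a + 1)
    else if ch = '>' then (if a = 0 then false else pvLoopB rest p c s (a - 1))
    else pvLoopB rest p c s a

def valid_intersecting_brackets_alt (input : String) : Bool :=
  pvLoopB input.toList 0 0 0 0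

-- ===== PRECONDITION & SPEC =====
def Spec_valid_intersecting_brackets (input : String) (out : Bool) : Prop := out = valid_intersecting_brackets_alt input
instance (input : String) (out : Bool) : Decidable (Spec_valid_intersecting_brackets input out) := by unfold Spec_valid_intersecting_brackets; infer_instance

-- ===== CLAIM (what is proved, stated in full; the proofs are below) =====
def Claim_equal_valid_intersecting_brackets : Prop := ∀ (input : String), Dom_valid_intersecting_brackets input → Spec_valid_intersecting_brackets input (valid_intersecting_brackets input)

-- ===== LEMMAS AND PROOFS =====

lemma pvPopFirst_eq_none {o : Char} {l : List Char} : pvPopFirst o l = none ↔ o ∉ l := by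
  induction l with
  | nil => simp [pvPopFirst]
  | cons x xs ih =>
    simp only [pvPopFirst]
    by_cases h : o = x
    · simp [h]
    · simp [h, Option.map_eq_none_iff, ih]

lemma pvPopFirst_some_count {o : Char} {l l' : List Char} (h : pvPopFirst o l = some l') :
    ∀ y : Char, l.count y = l'.count y + (if y = o then 1 else 0) := by
  induction l generalizing l' with
  | nil => simp [pvPopFirst] at h
  | cons x xs ih =>
    simp only [pvPopFirst] at h
    by_cases hx : o = x
    · subst hx
      simp only [reduceIte, Option.some.injEq] at h
      subst h
      intro y
      rw [List.count_cons]
      rcases eq_or_ne y o with hy | hy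
      · simp [hy]
      · simp [hy, Ne.symm hy]
    · simp only [if_neg hx, Option.map_eq_some_iff] at h
      obtain ⟨l'', h1, h2⟩ := h
      intro y
      have hxy := ih h1 y
      subst h2
      rw [List.count_cons, List.count_cons, hxy]
      omega

lemma pvPopFirst_some_mem {o : Char} {l l' : List Char} (h : pvPopFirst o l = some l') :
    ∀ x ∈ l', x ∈ l := by
  induction l generalizing l' with
  | nil => simp [pvPopFirst] at h
  | cons x xs ih =>
    simp only [pvPopFirst] at h
    by_cases hx : o = x
    · subst hx
      simp only [reduceIte, Option.some.injEq] at h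
      subst h
      intro y hy; exact List.mem_cons_of_mem _ hy
    · simp only [if_neg hx, Option.map_eq_some_iff] at h
      obtain ⟨l'', h1, h2⟩ := h
      subst h2
      intro y hy
      rcases List.mem_cons.1 hy with hy | hy
      · exact hy ▸ List.mem_cons_self
      · exact List.mem_cons_of_mem _ (ih h1 y hy)

-- the set of characters A ever pushes
def pvIsOpen (x : Char) : Prop := x = '(' ∨ x = '{' ∨ x = '[' ∨ x = '<'

lemma pvStack_empty_iff {stack : List Char} (hst : ∀ x ∈ stack, pvIsOpen x) :
    stack.isEmpty = (decide (stack.count '(' = 0) && decide (stack.count '{' = 0)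
      && decide (stack.count '[' = 0) && decide (stack.count '<' = 0)) := by
  cases stack with
  | nil => simp
  | cons x xs =>
    have hx := hst x List.mem_cons_self
    simp only [List.isEmpty_cons, eq_comm (a := false)]
    rcases hx with h | h | h | h <;> subst h <;>
      simp

lemma pvCloseStep (rest stack : List Char) (o : Char)
    (hst : ∀ x ∈ stack, pvIsOpen x)
    (ih : ∀ st : List Char, (∀ x ∈ st, pvIsOpen x) →
      pvLoopA rest st
        = pvLoopB rest (st.count '(') (st.count '{') (st.count '[') (st.count '<')) :
    (match pvPopFirst o stack with
      | some stack' => pvLoopA rest stack'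
      | none => false)
      = if stack.count o = 0 then false else
          pvLoopB rest ((stack.count '(') - (if '(' = o then 1 else 0))
            ((stack.count '{') - (if '{' = o then 1 else 0))
            ((stack.count '[') - (if '[' = o then 1 else 0))
            ((stack.count '<') - (if '<' = o then 1 else 0)) := by
  by_cases hz : stack.count o = 0
  · rw [pvPopFirst_eq_none.2 (by simpa [List.count_eq_zero] using hz)]
    simp [hz]
  · obtain ⟨st', hpop⟩ : ∃ st', pvPopFirst o stack = some st' := by
      cases hp : pvPopFirst o stack with
      | none => exact absurd (List.count_eq_zero.2 (pvPopFirst_eq_none.1 hp)) hz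
      | some s => exact ⟨s, rfl⟩
    rw [hpop, if_neg hz]
    have hst' : ∀ x ∈ st', pvIsOpen x := fun x hx => hst x (pvPopFirst_some_mem hpop x hx)
    show pvLoopA rest st' = _
    rw [ih _ hst']
    have hcnt := pvPopFirst_some_count hpop
    have e1 := hcnt '('
    have e2 := hcnt '{'
    have e3 := hcnt '['
    have e4 := hcnt '<'
    congr 1 <;> omega

lemma pvMain : ∀ (rest stack : List Char), (∀ x ∈ stack, pvIsOpen x) →
    pvLoopA rest stack
      = pvLoopB rest (stack.count '(') (stack.count '{') (stack.count '[') (stack.count '<') := by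
  intro rest
  induction rest with
  | nil =>
    intro stack hst
    simp only [pvLoopA, pvLoopB]
    exact pvStack_empty_iff hst
  | cons c rest ih =>
    intro stack hst
    simp only [pvLoopA]
    by_cases hop : c = '(' ∨ c = '{' ∨ c = '[' ∨ c = '<'
    · rw [if_pos hop]
      have hst' : ∀ x ∈ stack ++ [c], pvIsOpen x := by
        intro x hx
        rcases List.mem_append.1 hx with h | h
        · exact hst x h
        · simp at h; subst h; exact hop
      rw [ih _ hst']
      rcases hop with h | h | h | h <;> subst h <;>
        simp [pvLoopB, List.count_append]
    · rw [if_neg hop]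
      have hnp : c ≠ '(' := fun h => hop (Or.inl h)
      have hnc : c ≠ '{' := fun h => hop (Or.inr (Or.inl h))
      have hns : c ≠ '[' := fun h => hop (Or.inr (Or.inr (Or.inl h)))
      have hna : c ≠ '<' := fun h => hop (Or.inr (Or.inr (Or.inr h)))
      by_cases h1 : c = ')'
      · subst h1
        have := pvCloseStep rest stack '(' hst ih
        simp only [pvOpenOf, pvLoopB, Char.reduceEq, reduceIte] at this ⊢
        exact this
      · by_cases h2 : c = '}'
        · subst h2
          have := pvCloseStep rest stack '{' hst ih
          simp only [pvOpenOf, pvLoopB, Char.reduceEq, reduceIte] at this ⊢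
          exact this
        · by_cases h3 : c = ']'
          · subst h3
            have := pvCloseStep rest stack '[' hst ih
            simp only [pvOpenOf, pvLoopB, Char.reduceEq, reduceIte] at this ⊢
            exact this
          · by_cases h4 : c = '>'
            · subst h4
              have := pvCloseStep rest stack '<' hst ih
              simp only [pvOpenOf, pvLoopB, Char.reduceEq, reduceIte] at this ⊢
              exact this
            · have : pvOpenOf c = none := by
                simp [pvOpenOf, h1, h2, h3, h4]
              rw [this]
              simp only [pvLoopB, if_neg hnp, if_neg h1, if_neg hnc, if_neg h2,
                if_neg hns, if_neg h3, if_neg hna, if_neg h4]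
              exact ih _ hst

-- ===== VERDICT (by name: the statement is the Claim_ definition above) =====
theorem valid_intersecting_brackets_spec : Claim_equal_valid_intersecting_brackets := by
  intro input _
  unfold Spec_valid_intersecting_brackets valid_intersecting_brackets valid_intersecting_brackets_alt
  simpa using pvMain input.toList [] (by simp)
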